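-- pv_equiv track=rewrite | github.com/BoYuanVisionary/DistributedSampling | utils.py | even_odd_layer
-- ===== SOURCE A (Python) =====
-- import math
--
-- def even_odd_layer(num_distributions):
--     even_list = []
--     odd_list = []
--     for i in range(num_distributions):
--         layer = math.floor(math.log2(i+1))
--         if layer % 2 == 0:
--             even_list.append(i)
--         else:
--             odd_list.append(i)
--     return even_list, odd_list
-- ===== SOURCE B (Python) =====
-- def even_odd_layer(num_distributions):
--     even_list = []
--     odd_list = []
--     k = 0
--     while True:
--         lo = 2 ** k - 1
--         if lo >= num_distributions:
--             break
--         hi = 2 ** (k + 1) - 1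
--         block = list(range(lo, min(hi, num_distributions)))
--         if k % 2 == 0:
--             even_list.extend(block)
--         else:
--             odd_list.extend(block)
--         k += 1
--     return even_list, odd_list
-- ===== Notes on version B (the rewrite author's own statement) =====
-- stated objective: simpler
-- what changed: B walks contiguous power-of-two layer blocks and extends even_list or odd_list with a whole range per layer, instead of computing a floor-log2 per index.
import Mathlib
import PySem

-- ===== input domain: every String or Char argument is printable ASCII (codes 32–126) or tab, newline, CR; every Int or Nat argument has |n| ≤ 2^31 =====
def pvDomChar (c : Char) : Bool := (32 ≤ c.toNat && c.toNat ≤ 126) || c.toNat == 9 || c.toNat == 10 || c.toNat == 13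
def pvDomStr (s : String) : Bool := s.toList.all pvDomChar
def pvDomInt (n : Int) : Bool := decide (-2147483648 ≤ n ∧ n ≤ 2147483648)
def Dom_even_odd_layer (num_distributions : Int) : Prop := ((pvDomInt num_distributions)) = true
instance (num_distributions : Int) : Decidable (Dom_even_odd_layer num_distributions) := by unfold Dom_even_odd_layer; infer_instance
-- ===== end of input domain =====

-- B replaces the per-index floor(log2) computation by traversing contiguous power-of-two layer blocks (simpler decomposition; no per-element log).

-- ===== PORT A =====
-- math.floor(math.log2(i+1)) is ported as Nat.log2 (i+1).toNat: exact for 1 ≤ i+1 ≤ 2^31+1,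
-- where the double-precision log2 is known to floor correctly.
def even_odd_layer (num_distributions : Int) : List Int × List Int :=
  (PySem.List.pyRange 0 num_distributions 1).foldl
    (fun (st : List Int × List Int) i =>
      let layer : Nat := Nat.log2 (i + 1).toNat
      if layer % 2 == 0 then (st.1 ++ [i], st.2) else (st.1, st.2 ++ [i]))
    ([], [])

-- ===== PORT B =====
-- the 'while True' loop of Source B, with state (k, even_list, odd_list); the Nat argument is a
-- totality guard only (never exhausted for the fuel passed below, since 2^k - 1 grows by at
-- least 1 per iteration)
def evenOddAltLoop (fuel : Nat) (n : Int) (k : Nat) (ev od : List Int) : List Int × List Int :=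
  match fuel with
  | 0 => (ev, od)
  | fuel + 1 =>
    let lo : Int := 2 ^ k - 1
    if lo ≥ n then (ev, od)
    else
      let hi : Int := 2 ^ (k + 1) - 1
      let block := PySem.List.pyRange lo (min hi n) 1
      if k % 2 == 0 then evenOddAltLoop fuel n (k + 1) (ev ++ block) od
      else evenOddAltLoop fuel n (k + 1) ev (od ++ block)

def even_odd_layer_alt (num_distributions : Int) : List Int × List Int :=
  evenOddAltLoop (num_distributions.toNat + 1) num_distributions 0 [] []

-- ===== PRECONDITION & SPEC =====
def Spec_even_odd_layer (num_distributions : Int) (out : List Int × List Int) : Prop := out = even_odd_layer_alt num_distributions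
instance (num_distributions : Int) (out : List Int × List Int) : Decidable (Spec_even_odd_layer num_distributions out) := by unfold Spec_even_odd_layer; infer_instance

-- ===== CLAIM (what is proved, stated in full; the proofs are below) =====
def Claim_equal_even_odd_layer : Prop := ∀ (num_distributions : Int), Dom_even_odd_layer num_distributions → Spec_even_odd_layer num_distributions (even_odd_layer num_distributions)

-- ===== LEMMAS AND PROOFS =====

-- the parity predicate both programs partition by
def pvLayerEven (i : Int) : Bool := Nat.log2 (i + 1).toNat % 2 == 0

lemma pyRange_empty (a b : Int) (h : b ≤ a) : PySem.List.pyRange a b 1 = [] :=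
  List.eq_nil_iff_forall_not_mem.mpr (fun x hx => by
    have := PySem.List.mem_pyRange_one.mp hx; omega)

lemma foldA_eq (l : List Int) (ev od : List Int) :
    l.foldl (fun (st : List Int × List Int) i =>
        let layer : Nat := Nat.log2 (i + 1).toNat
        if layer % 2 == 0 then (st.1 ++ [i], st.2) else (st.1, st.2 ++ [i])) (ev, od)
      = (ev ++ l.filter pvLayerEven, od ++ l.filter (fun i => !pvLayerEven i)) := by
  induction l generalizing ev od with
  | nil => simp
  | cons x xs ih =>
    rw [List.foldl_cons]
    by_cases h : pvLayerEven x
    · have hb : ((x + 1).toNat.log2 % 2 == 0) = true := h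
      have hstep : (let layer := (x + 1).toNat.log2;
          if layer % 2 == 0 then ((ev, od).1 ++ [x], (ev, od).2)
          else ((ev, od).1, (ev, od).2 ++ [x])) = ((ev ++ [x], od) : List Int × List Int) := by
        simp [hb]
      rw [hstep, ih]
      simp [h]
    · have hb : ((x + 1).toNat.log2 % 2 == 0) = false := by
        simpa [pvLayerEven] using h
      have hstep : (let layer := (x + 1).toNat.log2;
          if layer % 2 == 0 then ((ev, od).1 ++ [x], (ev, od).2)
          else ((ev, od).1, (ev, od).2 ++ [x])) = ((ev, od ++ [x]) : List Int × List Int) := by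
        simp [hb]
      rw [hstep, ih]
      simp [h]

lemma log2_block (k : Nat) (i : Int) (h1 : 2 ^ k - 1 ≤ i) (h2 : i < 2 ^ (k + 1) - 1) :
    Nat.log2 (i + 1).toNat = k := by
  have hp : (2:Int) ^ (k + 1) = 2 ^ k * 2 := pow_succ 2 k
  have hc : ((2:Nat) ^ k : Int) = (2:Int) ^ k := by push_cast; ring
  have hc' : ((2:Nat) ^ (k + 1) : Int) = (2:Int) ^ (k + 1) := by push_cast; ring
  have hlo : 2 ^ k ≤ (i + 1).toNat := by omega
  have hhi : (i + 1).toNat < 2 ^ (k + 1) := by omega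
  rw [Nat.log2_eq_log_two]
  exact Nat.log_eq_of_pow_le_of_lt_pow hlo hhi

lemma pyRange_split (n : Int) (k : Nat) :
    PySem.List.pyRange (2 ^ k - 1) n 1
      = PySem.List.pyRange (2 ^ k - 1) (min (2 ^ (k + 1) - 1) n) 1
          ++ PySem.List.pyRange (2 ^ (k + 1) - 1) n 1 := by
  have h1 : (2:Int) ^ (k + 1) = 2 ^ k * 2 := pow_succ 2 k
  have h2 : (1:Int) ≤ 2 ^ k := one_le_pow₀ (by norm_num)
  rcases le_or_gt (2 ^ (k + 1) - 1) n with h | h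
  · rw [min_eq_left h]
    exact PySem.List.pyRange_one_append (2 ^ k - 1) (2 ^ (k + 1) - 1) n (by omega) h
  · rw [min_eq_right (le_of_lt h), pyRange_empty (2 ^ (k + 1) - 1) n (by omega),
        List.append_nil]

lemma filter_block_even (k : Nat) (hk : k % 2 = 0) (n : Int) :
    (PySem.List.pyRange (2 ^ k - 1) (min (2 ^ (k + 1) - 1) n) 1).filter pvLayerEven
        = PySem.List.pyRange (2 ^ k - 1) (min (2 ^ (k + 1) - 1) n) 1
    ∧ (PySem.List.pyRange (2 ^ k - 1) (min (2 ^ (k + 1) - 1) n) 1).filter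
        (fun i => !pvLayerEven i) = [] := by
  constructor
  · apply List.filter_eq_self.mpr
    intro i hi
    have := (PySem.List.mem_pyRange_one.mp hi)
    have hlog := log2_block k i (by omega) (by omega)
    simp [pvLayerEven, hlog, hk]
  · apply List.filter_eq_nil_iff.mpr
    intro i hi
    have := (PySem.List.mem_pyRange_one.mp hi)
    have hlog := log2_block k i (by omega) (by omega)
    simp [pvLayerEven, hlog, hk]

lemma filter_block_odd (k : Nat) (hk : k % 2 = 1) (n : Int) :
    (PySem.List.pyRange (2 ^ k - 1) (min (2 ^ (k + 1) - 1) n) 1).filter pvLayerEven = []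
    ∧ (PySem.List.pyRange (2 ^ k - 1) (min (2 ^ (k + 1) - 1) n) 1).filter
        (fun i => !pvLayerEven i)
        = PySem.List.pyRange (2 ^ k - 1) (min (2 ^ (k + 1) - 1) n) 1 := by
  constructor
  · apply List.filter_eq_nil_iff.mpr
    intro i hi
    have := (PySem.List.mem_pyRange_one.mp hi)
    have hlog := log2_block k i (by omega) (by omega)
    simp [pvLayerEven, hlog, hk]
  · apply List.filter_eq_self.mpr
    intro i hi
    have := (PySem.List.mem_pyRange_one.mp hi)
    have hlog := log2_block k i (by omega) (by omega)
    simp [pvLayerEven, hlog, hk]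

lemma loop_stop (fuel : Nat) (n : Int) (k : Nat) (ev od : List Int) (h : 2 ^ k - 1 ≥ n) :
    evenOddAltLoop fuel n k ev od = (ev, od) := by
  cases fuel with
  | zero => rw [evenOddAltLoop]
  | succ fuel => rw [evenOddAltLoop]; simp [h]

lemma loop_even (fuel : Nat) (n : Int) (k : Nat) (ev od : List Int) (h : ¬ 2 ^ k - 1 ≥ n)
    (hk : k % 2 = 0) :
    evenOddAltLoop (fuel + 1) n k ev od
      = evenOddAltLoop fuel n (k + 1)
          (ev ++ PySem.List.pyRange (2 ^ k - 1) (min (2 ^ (k + 1) - 1) n) 1) od := by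
  rw [evenOddAltLoop]; simp [h, hk]

lemma loop_odd (fuel : Nat) (n : Int) (k : Nat) (ev od : List Int) (h : ¬ 2 ^ k - 1 ≥ n)
    (hk : k % 2 = 1) :
    evenOddAltLoop (fuel + 1) n k ev od
      = evenOddAltLoop fuel n (k + 1) ev
          (od ++ PySem.List.pyRange (2 ^ k - 1) (min (2 ^ (k + 1) - 1) n) 1) := by
  rw [evenOddAltLoop]
  have hk' : (k % 2 == 0) = false := by simp [hk]
  simp [h, hk']

lemma altLoop_eq (fuel : Nat) (n : Int) (k : Nat) (ev od : List Int)
    (hf : n ≤ 2 ^ k - 1 + fuel) :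
    evenOddAltLoop fuel n k ev od
      = (ev ++ (PySem.List.pyRange (2 ^ k - 1) n 1).filter pvLayerEven,
         od ++ (PySem.List.pyRange (2 ^ k - 1) n 1).filter (fun i => !pvLayerEven i)) := by
  induction fuel generalizing k ev od with
  | zero =>
    rw [loop_stop 0 n k ev od (by omega), pyRange_empty _ _ (by omega)]
    simp
  | succ fuel ih =>
    by_cases hge : 2 ^ k - 1 ≥ n
    · rw [loop_stop _ n k ev od hge, pyRange_empty _ _ hge]
      simp
    · have h1 : (2:Int) ^ (k + 1) = 2 ^ k * 2 := pow_succ 2 k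
      have h2 : (1:Int) ≤ 2 ^ k := one_le_pow₀ (by norm_num)
      have hf' : n ≤ 2 ^ (k + 1) - 1 + fuel := by omega
      rcases Nat.mod_two_eq_zero_or_one k with hk | hk
      · rw [loop_even fuel n k ev od hge hk, ih (k + 1) _ _ hf',
            pyRange_split n k, List.filter_append, List.filter_append]
        have hblk := filter_block_even k hk n
        rw [hblk.1, hblk.2]
        simp
      · rw [loop_odd fuel n k ev od hge hk, ih (k + 1) _ _ hf',
            pyRange_split n k, List.filter_append, List.filter_append]
        have hblk := filter_block_odd k hk n
        rw [hblk.1, hblk.2]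
        simp

-- ===== VERDICT (by name: the statement is the Claim_ definition above) =====
theorem even_odd_layer_spec : Claim_equal_even_odd_layer := by
  intro n _
  show even_odd_layer n = even_odd_layer_alt n
  rw [even_odd_layer, even_odd_layer_alt, foldA_eq,
      altLoop_eq (n.toNat + 1) n 0 [] [] (by omega)]
  norm_num
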